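-- pv_equiv track=rewrite | github.com/lvioli90/performance-observer | collectors/argo.py | _infer_phase_from_pod_phases
-- ===== SOURCE A (Python) =====
-- from typing import Any, Dict, List, Optional
--
-- def _infer_phase_from_pod_phases(phases: List[str]) -> str:
--     """
--     Infer the aggregate workflow phase from the set of its pod phases.
--
--     Rules (in priority order):
--       Failed  — any pod failed
--       Running — any pod is still running or pending
--       Succeeded — all pods in a terminal-success state
--       Running — default (conservative; catches empty or all-Unknown)
--     """
--     lower = {p.lower() for p in phases if p and p.lower() != "unknown"}
--     if "failed" in lower:
--         return "Failed"
--     if "running" in lower or "pending" in lower: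
--         return "Running"
--     if lower and lower.issubset({"succeeded"}):
--         return "Succeeded"
--     return "Running"
-- ===== SOURCE B (Python) =====
-- _SCORE = {"failed": 4, "running": 3, "pending": 3, "succeeded": 1}
-- _RESULT = ("Running", "Succeeded", "Running", "Running", "Failed")
--
-- def _infer_phase_from_pod_phases(phases):
--     m = max((_SCORE.get(p.lower(), 2) for p in phases
--              if p and p.lower() != "unknown"), default=0)
--     return _RESULT[m]
-- ===== Notes on version B (the rewrite author's own statement) =====
-- stated objective: alternative
-- what changed: Recasts the set-plus-priority-branches logic as a numeric severity maximum: each phase maps to a score (failed=4, running/pending=3, anything else=2, succeeded=1, skipped=0), the result is a table lookup at max(scores, default=0), so the branch chain and subset test disappear.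
import Mathlib
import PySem

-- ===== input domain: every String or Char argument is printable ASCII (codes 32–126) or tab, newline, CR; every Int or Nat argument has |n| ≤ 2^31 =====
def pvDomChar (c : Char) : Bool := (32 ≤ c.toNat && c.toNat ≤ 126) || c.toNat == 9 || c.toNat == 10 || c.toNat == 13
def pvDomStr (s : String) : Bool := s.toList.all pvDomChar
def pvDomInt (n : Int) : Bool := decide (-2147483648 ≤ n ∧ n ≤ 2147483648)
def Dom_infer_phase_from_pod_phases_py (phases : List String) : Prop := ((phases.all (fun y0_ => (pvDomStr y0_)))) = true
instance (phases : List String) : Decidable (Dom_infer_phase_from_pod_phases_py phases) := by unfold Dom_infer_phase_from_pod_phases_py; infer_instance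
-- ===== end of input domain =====

-- B recasts A's lowered-set + membership/subset branch chain as a numeric severity maximum with a result table (alternative decomposition; same cost).


-- ===== PORT A =====
-- lower = {p.lower() for p in phases if p and p.lower() != "unknown"}, then membership / subset tests
def infer_phase_from_pod_phases_py (phases : List String) : String :=
  let lower : PySem.Set String :=
    PySem.Set.ofList
      ((phases.filter (fun p => !(p == "") && !(PySem.Str.lower p == "unknown"))).map PySem.Str.lower)
  if PySem.Set.contains lower "failed" then "Failed"
  else if PySem.Set.contains lower "running" || PySem.Set.contains lower "pending" then "Running"
  else if !lower.isEmpty && PySem.Set.issubset lower (PySem.Set.ofList ["succeeded"]) then "Succeeded"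
  else "Running"

-- ===== PORT B =====
-- _SCORE = {"failed": 4, "running": 3, "pending": 3, "succeeded": 1}
def pvScoreDict : PySem.Dict String Nat :=
  PySem.Dict.mk [("failed", 4), ("running", 3), ("pending", 3), ("succeeded", 1)]  -- literal dict (distinct keys)
-- _RESULT = ("Running", "Succeeded", "Running", "Running", "Failed")
def pvResultTable : List String := ["Running", "Succeeded", "Running", "Running", "Failed"]

-- m = max(generator of _SCORE.get(p.lower(), 2), default=0); return _RESULT[m]
-- (_RESULT[m] is total in Python since every score is 0..4; List.getD's default is never used)
def infer_phase_from_pod_phases_py_alt (phases : List String) : String :=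
  let m : Nat :=
    ((phases.filter (fun p => !(p == "") && !(PySem.Str.lower p == "unknown"))).map
      (fun p => PySem.Dict.getD pvScoreDict (PySem.Str.lower p) 2)).foldl max 0
  pvResultTable.getD m "Running"

-- ===== PRECONDITION & SPEC =====
def Spec_infer_phase_from_pod_phases_py (phases : List String) (out : String) : Prop := out = infer_phase_from_pod_phases_py_alt phases
instance (phases : List String) (out : String) : Decidable (Spec_infer_phase_from_pod_phases_py phases out) := by unfold Spec_infer_phase_from_pod_phases_py; infer_instance

-- ===== CLAIM (what is proved, stated in full; the proofs are below) =====
def Claim_equal_infer_phase_from_pod_phases_py : Prop := ∀ (phases : List String), Dom_infer_phase_from_pod_phases_py phases → Spec_infer_phase_from_pod_phases_py phases (infer_phase_from_pod_phases_py phases)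

-- ===== LEMMAS AND PROOFS =====

-- per-element classifiers used only by the proofs
def pvF (p : String) : Bool := !(p == "") && (PySem.Str.lower p == "failed")
def pvR (p : String) : Bool := !(p == "") && (PySem.Str.lower p == "running" || PySem.Str.lower p == "pending")
def pvS (p : String) : Bool := !(p == "") && (PySem.Str.lower p == "succeeded")
def pvO (p : String) : Bool := !(p == "") && !(PySem.Str.lower p == "unknown")
  && !(PySem.Str.lower p == "failed") && !(PySem.Str.lower p == "running")
  && !(PySem.Str.lower p == "pending") && !(PySem.Str.lower p == "succeeded")

-- the severity value determined by the four flags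
def pvG (f r o s : Bool) : Nat :=
  if f then 4 else if r then 3 else if o then 2 else if s then 1 else 0

theorem pvG_max : ∀ f1 r1 o1 s1 f2 r2 o2 s2 : Bool,
    max (pvG f1 r1 o1 s1) (pvG f2 r2 o2 s2) = pvG (f1 || f2) (r1 || r2) (o1 || o2) (s1 || s2) := by
  decide

-- an element passing A's / B's filter gets exactly the score of its class
theorem pvScore_eq (p : String) (h1 : (p == "") = false) (h2 : (PySem.Str.lower p == "unknown") = false) :
    PySem.Dict.getD pvScoreDict (PySem.Str.lower p) 2 = pvG (pvF p) (pvR p) (pvO p) (pvS p) := by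
  cases h3 : (PySem.Str.lower p == "failed") with
  | true =>
    have e : PySem.Str.lower p = "failed" := by rwa [beq_iff_eq] at h3
    have eF : pvF p = true := by simp [pvF, h1, h3]
    rw [e, eF]; simp [pvG]; decide
  | false =>
  cases h4 : (PySem.Str.lower p == "running") with
  | true =>
    have e : PySem.Str.lower p = "running" := by rwa [beq_iff_eq] at h4
    have eF : pvF p = false := by simp [pvF, h3]
    have eR : pvR p = true := by simp [pvR, h1, h4]
    rw [e, eF, eR]; simp [pvG]; decide
  | false =>
  cases h5 : (PySem.Str.lower p == "pending") with
  | true =>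
    have e : PySem.Str.lower p = "pending" := by rwa [beq_iff_eq] at h5
    have eF : pvF p = false := by simp [pvF, h3]
    have eR : pvR p = true := by simp [pvR, h1, h5]
    rw [e, eF, eR]; simp [pvG]; decide
  | false =>
  cases h6 : (PySem.Str.lower p == "succeeded") with
  | true =>
    have e : PySem.Str.lower p = "succeeded" := by rwa [beq_iff_eq] at h6
    have eF : pvF p = false := by simp [pvF, h3]
    have eR : pvR p = false := by simp [pvR, h4, h5]
    have eO : pvO p = false := by simp [pvO, h6]
    have eS : pvS p = true := by simp [pvS, h1, h6]
    rw [e, eF, eR, eO, eS]; simp [pvG]; decide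
  | false =>
    have hf : pvF p = false := by simp [pvF, h3]
    have hr : pvR p = false := by simp [pvR, h4, h5]
    have hs : pvS p = false := by simp [pvS, h6]
    have ho : pvO p = true := by simp [pvO, h1, h2, h3, h4, h5, h6]
    have e3 : ¬ PySem.Str.lower p = "failed" := by simpa using h3
    have e4 : ¬ PySem.Str.lower p = "running" := by simpa using h4
    have e5 : ¬ PySem.Str.lower p = "pending" := by simpa using h5
    have e6 : ¬ PySem.Str.lower p = "succeeded" := by simpa using h6
    have hg : PySem.Dict.get? pvScoreDict (PySem.Str.lower p) = none := by
      simp [pvScoreDict, Ne.symm e3, Ne.symm e4, Ne.symm e5, Ne.symm e6, PySem.Dict.get?]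
    simp [PySem.Dict.getD, hg, hf, hr, ho, pvG]

-- an element failing the filter is in no class
theorem pv_none (p : String) (h : (!(p == "") && !(PySem.Str.lower p == "unknown")) = false) :
    pvF p = false ∧ pvR p = false ∧ pvO p = false ∧ pvS p = false := by
  rcases Bool.and_eq_false_iff.mp h with h | h
  · have h1 : (p == "") = true := by simpa using h
    exact ⟨by simp [pvF, h1], by simp [pvR, h1], by simp [pvO, h1], by simp [pvS, h1]⟩
  · have h2 : PySem.Str.lower p = "unknown" := by simpa using h
    exact ⟨by simp [pvF, h2], by simp [pvR, h2], by simp [pvO, h2], by simp [pvS, h2]⟩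

-- B's filtered-scores maximum, characterised by the four 'any' flags
theorem foldl_score (phases : List String) : ∀ f r o s : Bool,
    ((phases.filter (fun p => !(p == "") && !(PySem.Str.lower p == "unknown"))).map
      (fun p => PySem.Dict.getD pvScoreDict (PySem.Str.lower p) 2)).foldl max (pvG f r o s)
    = pvG (f || phases.any pvF) (r || phases.any pvR) (o || phases.any pvO) (s || phases.any pvS) := by
  induction phases with
  | nil => simp
  | cons p ps ih =>
    intro f r o s
    cases hc : (!(p == "") && !(PySem.Str.lower p == "unknown")) with
    | false =>
      obtain ⟨e1, e2, e3, e4⟩ := pv_none p hc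
      simp only [List.filter_cons, hc, Bool.false_eq_true, if_false, List.any_cons,
        e1, e2, e3, e4, Bool.false_or]
      exact ih f r o s
    | true =>
      obtain ⟨c1, c2⟩ := Bool.and_eq_true_iff.mp hc
      have c1' : (p == "") = false := by simpa using c1
      have c2' : (PySem.Str.lower p == "unknown") = false := by simpa using c2
      simp only [List.filter_cons, hc, if_true, List.map_cons, List.foldl_cons, List.any_cons]
      rw [pvScore_eq p c1' c2', pvG_max, ih]
      simp [Bool.or_assoc]

-- membership of a fixed non-"unknown" target in A's lowered set, as an 'any' over phases
theorem contains_L (phases : List String) (t : String) (ht : ¬ t = "unknown") :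
    (PySem.Set.ofList
      ((phases.filter (fun p => !(p == "") && !(PySem.Str.lower p == "unknown"))).map PySem.Str.lower)).contains t
      = phases.any (fun p => !(p == "") && (PySem.Str.lower p == t)) := by
  rw [Bool.eq_iff_iff]
  simp only [PySem.Set.contains_iff, PySem.Set.mem_ofList, List.mem_map, List.mem_filter,
    List.any_eq_true, Bool.and_eq_true, Bool.not_eq_eq_eq_not, Bool.not_true, beq_eq_false_iff_ne,
    ne_eq, beq_iff_eq]
  constructor
  · rintro ⟨p, ⟨hp, hne, _⟩, hl⟩
    exact ⟨p, hp, hne, hl⟩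
  · rintro ⟨p, hp, hne, hl⟩
    exact ⟨p, ⟨hp, hne, by rw [hl]; exact ht⟩, hl⟩

theorem any_or_split (xs : List String) (f g : String → Bool) :
    xs.any (fun p => f p || g p) = (xs.any f || xs.any g) := by
  induction xs with
  | nil => rfl
  | cons x xs ih =>
    simp only [List.any_cons, ih]
    cases f x <;> cases g x <;> simp

-- an element passing A's filter falls in exactly one of the four classes
theorem pv_classify (p : String)
    (h1 : (p == "") = false) (h2 : (PySem.Str.lower p == "unknown") = false)
    (h3 : (PySem.Str.lower p == "failed") = false) (h4 : (PySem.Str.lower p == "running") = false)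
    (h5 : (PySem.Str.lower p == "pending") = false) (h6 : (PySem.Str.lower p ≠ "succeeded")) :
    pvO p = true := by
  simp [pvO, h1, h2, h3, h4, h5, h6]

theorem third_cond (phases : List String)
    (hf : phases.any pvF = false) (hr : phases.any pvR = false) :
    (!(PySem.Set.ofList
        ((phases.filter (fun p => !(p == "") && !(PySem.Str.lower p == "unknown"))).map PySem.Str.lower)).isEmpty
      && PySem.Set.issubset
          (PySem.Set.ofList
            ((phases.filter (fun p => !(p == "") && !(PySem.Str.lower p == "unknown"))).map PySem.Str.lower))
          (PySem.Set.ofList ["succeeded"]))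
      = (phases.any pvS && !phases.any pvO) := by
  have hf' : ∀ p ∈ phases, pvF p = false := by
    intro p hp; by_contra h
    have : phases.any pvF = true := List.any_eq_true.2 ⟨p, hp, by simpa using h⟩
    simp [this] at hf
  have hr' : ∀ p ∈ phases, pvR p = false := by
    intro p hp; by_contra h
    have : phases.any pvR = true := List.any_eq_true.2 ⟨p, hp, by simpa using h⟩
    simp [this] at hr
  rw [Bool.eq_iff_iff]
  simp only [Bool.and_eq_true, Bool.not_eq_eq_eq_not, Bool.not_true, List.isEmpty_eq_false_iff_exists_mem,
    PySem.Set.issubset_iff, PySem.Set.mem_ofList, List.mem_map, List.mem_filter, List.any_eq_true,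
    List.mem_singleton, List.any_eq_false]
  constructor
  · rintro ⟨⟨x, p, ⟨hp, hc⟩, hl⟩, hsub⟩
    have hx : x = "succeeded" := hsub x ⟨p, ⟨hp, hc⟩, hl⟩
    refine ⟨⟨p, hp, ?_⟩, ?_⟩
    · simp [pvS, hc.1, hl, hx]
    · intro q hq
      by_contra ho
      have hoT : pvO q = true := by simpa using ho
      have hq1 : (q == "") = false := by
        simp only [pvO, Bool.and_eq_true, Bool.not_eq_eq_eq_not, Bool.not_true] at hoT
        exact hoT.1.1.1.1.1
      have hq2 : (PySem.Str.lower q == "unknown") = false := by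
        simp only [pvO, Bool.and_eq_true, Bool.not_eq_eq_eq_not, Bool.not_true] at hoT
        exact hoT.1.1.1.1.2
      have hq6 : (PySem.Str.lower q == "succeeded") = false := by
        simp only [pvO, Bool.and_eq_true, Bool.not_eq_eq_eq_not, Bool.not_true] at hoT
        exact hoT.2
      have hmem : PySem.Str.lower q = "succeeded" :=
        hsub (PySem.Str.lower q) ⟨q, ⟨hq, by simp [hq1, hq2]⟩, rfl⟩
      rw [hmem] at hq6
      exact absurd hq6 (by decide)
  · rintro ⟨⟨p, hp, hs⟩, ho⟩
    have hs' := hs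
    simp only [pvS, Bool.and_eq_true, Bool.not_eq_eq_eq_not, Bool.not_true, beq_iff_eq] at hs'
    obtain ⟨hp1, hp2⟩ := hs'
    have hcp : (p == "") = false ∧ (PySem.Str.lower p == "unknown") = false :=
      ⟨hp1, by rw [hp2]; decide⟩
    refine ⟨⟨"succeeded", p, ⟨hp, hcp⟩, hp2⟩, ?_⟩
    rintro x ⟨q, ⟨hq, hq1, hq2⟩, hl⟩
    have hF := hf' q hq
    have hR := hr' q hq
    simp only [pvF, hq1, Bool.not_false, Bool.true_and] at hF
    simp only [pvR, hq1, Bool.not_false, Bool.true_and, Bool.or_eq_false_iff] at hR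
    by_contra hx
    have hq6 : PySem.Str.lower q ≠ "succeeded" := by rw [hl]; exact hx
    have hOq : pvO q = true := pv_classify q hq1 hq2 hF hR.1 hR.2 hq6
    have hcon := ho q hq
    rw [hOq] at hcon
    exact absurd hcon (by decide)

theorem infer_ports_agree (phases : List String) :
    infer_phase_from_pod_phases_py phases = infer_phase_from_pod_phases_py_alt phases := by
  have hB : infer_phase_from_pod_phases_py_alt phases
      = pvResultTable.getD (pvG (phases.any pvF) (phases.any pvR) (phases.any pvO) (phases.any pvS)) "Running" := by
    simp only [infer_phase_from_pod_phases_py_alt]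
    have h0 : (0 : Nat) = pvG false false false false := rfl
    rw [h0, foldl_score phases false false false false]
    simp
  rw [hB]
  simp only [infer_phase_from_pod_phases_py]
  rw [contains_L phases "failed" (by decide), contains_L phases "running" (by decide),
    contains_L phases "pending" (by decide)]
  have hF : (phases.any fun p => !(p == "") && (PySem.Str.lower p == "failed")) = phases.any pvF := rfl
  have hRRun : ((phases.any fun p => !(p == "") && (PySem.Str.lower p == "running"))
      || (phases.any fun p => !(p == "") && (PySem.Str.lower p == "pending"))) = phases.any pvR := by
    rw [← any_or_split]
    apply congrArg
    funext p
    simp only [pvR]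
    cases h : (p == "") <;> simp
  rw [hF, hRRun]
  by_cases hf : phases.any pvF = true
  · simp [hf, pvG, pvResultTable]
  · have hf' : phases.any pvF = false := by simpa using hf
    simp only [hf', Bool.false_eq_true, if_false]
    by_cases hr : phases.any pvR = true
    · simp [hr, pvG, pvResultTable]
    · have hr' : phases.any pvR = false := by simpa using hr
      simp only [hr', Bool.false_eq_true, if_false]
      rw [third_cond phases hf' hr']
      cases ho : phases.any pvO <;> cases hs : phases.any pvS <;>
        simp [pvG, pvResultTable]

-- ===== VERDICT (by name: the statement is the Claim_ definition above) =====
theorem infer_phase_from_pod_phases_py_spec : Claim_equal_infer_phase_from_pod_phases_py := by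
  intro phases _
  exact infer_ports_agree phases
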